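-- pv_equiv track=rewrite | github.com/ammarsksk/GHCI | src/train_eval_v6_faststack.py | _augment_hierarchy
-- ===== SOURCE A (Python) =====
-- from typing import List, Dict, Tuple
--
-- def _augment_hierarchy(base_map: Dict[str, List[str]], fines: List[str]) -> Tuple[Dict[str, List[str]], Dict[str, str], List[str]]:
--     ctf = {k: list(v) for k, v in base_map.items()}
--     existing = set(sum(ctf.values(), []))
--
--     def guess(lbl: str) -> str:
--         if lbl in {'DINING','GROCERIES'}:
--             return 'FOOD'
--         if lbl.startswith('UTILITIES_'):
--             return 'UTILITIES'
--         if lbl in {'TRAVEL','FUEL','MOBILITY'}: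
--             return 'TRAVEL'
--         if lbl in {'SHOPPING_ECOM','SHOPPING_ELECTRONICS','ENTERTAINMENT','EDUCATION','HOME_IMPROVEMENT','SUBSCRIPTIONS'}:
--             return 'SHOPPING'
--         if lbl == 'HEALTH':
--             return 'HEALTH'
--         return 'OTHER_MISC'
--
--     for lbl in fines:
--         if lbl not in existing:
--             ctf.setdefault(guess(lbl), []).append(lbl)
--             existing.add(lbl)
--
--     f2c: Dict[str, str] = {}
--     for c, kids in ctf.items():
--         for k in kids:
--             f2c[k] = c
--     finelist = sorted(set(fines))
--     return ctf, f2c, finelist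
-- ===== SOURCE B (Python) =====
-- from typing import List, Dict, Tuple
--
-- def _augment_hierarchy(base_map: Dict[str, List[str]], fines: List[str]) -> Tuple[Dict[str, List[str]], Dict[str, str], List[str]]:
--     def guess(lbl: str) -> str:
--         if lbl in {'DINING','GROCERIES'}:
--             return 'FOOD'
--         if lbl.startswith('UTILITIES_'):
--             return 'UTILITIES'
--         if lbl in {'TRAVEL','FUEL','MOBILITY'}:
--             return 'TRAVEL'
--         if lbl in {'SHOPPING_ECOM','SHOPPING_ELECTRONICS','ENTERTAINMENT','EDUCATION','HOME_IMPROVEMENT','SUBSCRIPTIONS'}: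
--             return 'SHOPPING'
--         if lbl == 'HEALTH':
--             return 'HEALTH'
--         return 'OTHER_MISC'
--
--     # Stateless, staged construction: no mutable hierarchy, no seen-set loop.
--     known = {k for kids in base_map.values() for k in kids}
--     # the labels A would add, first occurrence each, in order
--     new_labels = [l for l in dict.fromkeys(fines) if l not in known]
--     coarses = [guess(l) for l in new_labels]
--     # gather every new group by a filter over new_labels (guess has few distinct values)
--     adds = {c: [l for l in new_labels if guess(l) == c] for c in dict.fromkeys(coarses)}
--     # final key order: base keys, then new coarse keys by first appearance
--     order = list(base_map) + [c for c in adds if c not in base_map]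
--     ctf = {c: list(base_map.get(c, [])) + adds.get(c, []) for c in order}
--     f2c = {k: c for c, kids in ctf.items() for k in kids}
--     return ctf, f2c, sorted(set(fines))
-- ===== Notes on version B (the rewrite author's own statement) =====
-- stated objective: alternative
-- what changed: A threads mutable state through one guarded loop (a seen-set built by quadratic sum(ctf.values(), []) plus setdefault/append mutation of the copied hierarchy) and then runs a separate reverse-index double loop; B is stateless and staged: dedup the fines, filter out the known kids, gather every new group by a filter over the deduped labels, then assemble ctf in one comprehension over the computed key order.
import Mathlib
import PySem

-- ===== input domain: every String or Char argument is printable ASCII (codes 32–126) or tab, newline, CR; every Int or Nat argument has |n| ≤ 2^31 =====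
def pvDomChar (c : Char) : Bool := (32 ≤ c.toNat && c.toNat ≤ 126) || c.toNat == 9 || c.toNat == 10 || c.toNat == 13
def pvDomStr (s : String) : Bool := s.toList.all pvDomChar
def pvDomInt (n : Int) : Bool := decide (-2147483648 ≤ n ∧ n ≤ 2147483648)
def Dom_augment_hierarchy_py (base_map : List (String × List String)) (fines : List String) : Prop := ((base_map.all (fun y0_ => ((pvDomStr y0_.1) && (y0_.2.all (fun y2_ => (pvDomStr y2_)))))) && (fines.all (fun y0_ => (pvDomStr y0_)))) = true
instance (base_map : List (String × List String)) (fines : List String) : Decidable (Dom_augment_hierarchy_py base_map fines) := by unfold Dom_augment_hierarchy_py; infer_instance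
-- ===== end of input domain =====

-- B replaces A's copy-then-mutate pass (mutable seen-set, setdefault/append into the dict) by a
-- stateless staged construction: dedup the fines, compute the key order, gather every group by a
-- filter; objective: alternative (a genuinely different, stateless decomposition).


-- The guess cascade, common helper text of both Pythons (B defines the identical cascade).
def guessCoarse (lbl : String) : String :=
  if lbl = "DINING" || lbl = "GROCERIES" then "FOOD"
  else if PySem.Str.startswith lbl "UTILITIES_" then "UTILITIES"
  else if lbl = "TRAVEL" || lbl = "FUEL" || lbl = "MOBILITY" then "TRAVEL"
  else if lbl = "SHOPPING_ECOM" || lbl = "SHOPPING_ELECTRONICS" || lbl = "ENTERTAINMENT" ||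
          lbl = "EDUCATION" || lbl = "HOME_IMPROVEMENT" || lbl = "SUBSCRIPTIONS" then "SHOPPING"
  else if lbl = "HEALTH" then "HEALTH"
  else "OTHER_MISC"

-- ===== PORT A =====
def augment_hierarchy_py (base_map : List (String × List String)) (fines : List String) : (List (String × List String)) × (List (String × String)) × List String :=
  -- ctf = {k: list(v) for k, v in base_map.items()}   (copying a pure value is the identity)
  let ctf : PySem.Dict String (List String) := PySem.Dict.mk base_map
  -- existing = set(sum(ctf.values(), []))
  let existing : PySem.Set String := PySem.Set.ofList (PySem.Dict.values ctf).flatten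
  -- for lbl in fines: if lbl not in existing: ctf.setdefault(guess(lbl), []).append(lbl); existing.add(lbl)
  -- (setdefault(g, []).append(lbl) is exactly ctf[g] = ctf.get(g, []) + [lbl], i.e. Dict.modify)
  let st := fines.foldl (fun st lbl =>
      if PySem.Set.contains st.2 lbl then st
      else (PySem.Dict.modify st.1 (guessCoarse lbl) [] (fun v => v ++ [lbl]), PySem.Set.add st.2 lbl))
    (ctf, existing)
  -- f2c = {}; for c, kids in ctf.items(): for k in kids: f2c[k] = c
  let f2c : PySem.Dict String String :=
    st.1.items.foldl (fun d ck => ck.2.foldl (fun d k => PySem.Dict.insert d k ck.1) d) PySem.Dict.empty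
  -- finelist = sorted(set(fines))
  let finelist := PySem.List.sorted (PySem.Set.ofList fines) (fun x => x) false
  (st.1.items, f2c.items, finelist)

-- ===== PORT B =====
def augment_hierarchy_py_alt (base_map : List (String × List String)) (fines : List String) : (List (String × List String)) × (List (String × String)) × List String :=
  -- known = {k for kids in base_map.values() for k in kids}
  let known : PySem.Set String := PySem.Set.ofList (base_map.map (fun p => p.2)).flatten
  -- new_labels = [l for l in dict.fromkeys(fines) if l not in known]
  let new_labels := (PySem.List.dedup fines).filter (fun l => !PySem.Set.contains known l)
  -- coarses = [guess(l) for l in new_labels]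
  let coarses := new_labels.map guessCoarse
  -- adds = {c: [l for l in new_labels if guess(l) == c] for c in dict.fromkeys(coarses)}
  -- (the comprehension's keys 'dict.fromkeys(coarses)' are distinct, so the dict IS this list)
  let adds : PySem.Dict String (List String) := PySem.Dict.mk
      ((PySem.List.dedup coarses).map (fun c => (c, new_labels.filter (fun l => guessCoarse l == c))))
  -- order = list(base_map) + [c for c in adds if c not in base_map]
  let order := base_map.map Prod.fst ++
      adds.keys.filter (fun c => !(PySem.Dict.mk base_map).contains c)
  -- ctf = {c: list(base_map.get(c, [])) + adds.get(c, []) for c in order}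
  let ctf := order.map (fun c =>
      (c, (PySem.Dict.mk base_map).getD c [] ++ adds.getD c []))
  -- f2c = {k: c for c, kids in ctf.items() for k in kids}
  let f2c : PySem.Dict String String :=
    ctf.foldl (fun d ck => ck.2.foldl (fun d k => PySem.Dict.insert d k ck.1) d) PySem.Dict.empty
  (ctf, f2c.items, PySem.List.sorted (PySem.Set.ofList fines) (fun x => x) false)

-- ===== PRECONDITION & SPEC =====
-- base_map is a Python dict: its keys are necessarily pairwise distinct. An association list with a
-- duplicated key does not represent any input of the Python function, so those lists are excluded.
def Pre_augment_hierarchy_py (base_map : List (String × List String)) (_fines : List String) : Prop :=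
  (base_map.map Prod.fst).Nodup
instance (base_map : List (String × List String)) (fines : List String) : Decidable (Pre_augment_hierarchy_py base_map fines) := by unfold Pre_augment_hierarchy_py; infer_instance
def pvWitness_augment_hierarchy_py : (List (String × List String)) × List String :=
  ([("FOOD", ["DINING"]), ("TRAVEL", ["FUEL"])], ["DINING", "HEALTH", "UTILITIES_GAS", "HEALTH"])

def Spec_augment_hierarchy_py (base_map : List (String × List String)) (fines : List String) (out : (List (String × List String)) × (List (String × String)) × List String) : Prop := out = augment_hierarchy_py_alt base_map fines
instance (base_map : List (String × List String)) (fines : List String) (out : (List (String × List String)) × (List (String × String)) × List String) : Decidable (Spec_augment_hierarchy_py base_map fines out) := by unfold Spec_augment_hierarchy_py; infer_instance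

-- ===== CLAIM (what is proved, stated in full; the proofs are below) =====
def Claim_equal_augment_hierarchy_py : Prop := ∀ (base_map : List (String × List String)) (fines : List String), Dom_augment_hierarchy_py base_map fines → Pre_augment_hierarchy_py base_map fines → Spec_augment_hierarchy_py base_map fines (augment_hierarchy_py base_map fines)

-- ===== LEMMAS AND PROOFS =====

-- membership in an enlarged seen-set
theorem pv_contains_add (ex : PySem.Set String) (a x : String) :
    PySem.Set.contains (PySem.Set.add ex a) x = (PySem.Set.contains ex x || x == a) := by
  by_cases h : a ∈ ex
  · rw [PySem.Set.add_of_mem h]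
    by_cases hx : x = a
    · subst hx
      simp [PySem.Set.contains, h]
    · simp [hx]
  · rw [PySem.Set.add_of_not_mem h]
    by_cases hx : x = a
    · subst hx
      simp [PySem.Set.contains]
    · simp [PySem.Set.contains, List.mem_append, hx]

-- The sublist of labels A's guarded loop actually processes, in order.
def pvSeq (ex : PySem.Set String) : List String → List String
  | [] => []
  | a :: t => if PySem.Set.contains ex a then pvSeq ex t else a :: pvSeq (PySem.Set.add ex a) t

-- A's guarded fold over fines is the plain modify-fold over pvSeq.
theorem pv_fold_factor (fines : List String) :
    ∀ (d : PySem.Dict String (List String)) (ex : PySem.Set String),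
    (fines.foldl (fun st lbl =>
        if PySem.Set.contains st.2 lbl then st
        else (PySem.Dict.modify st.1 (guessCoarse lbl) [] (fun v => v ++ [lbl]), PySem.Set.add st.2 lbl))
      (d, ex)).1
    = (pvSeq ex fines).foldl
        (fun d l => PySem.Dict.modify d (guessCoarse l) [] (fun v => v ++ [l])) d := by
  induction fines with
  | nil => intro d ex; rfl
  | cons a t ih =>
    intro d ex
    by_cases h : PySem.Set.contains ex a = true
    · simp only [List.foldl_cons, pvSeq, h, if_pos]
      exact ih d ex
    · simp only [List.foldl_cons, pvSeq, h, if_neg, Bool.not_eq_true, List.foldl_cons]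
      exact ih _ _

-- pvSeq is "dedup, then drop the already-seen labels".
theorem pv_seq_eq (fines : List String) :
    ∀ (ex : PySem.Set String),
    pvSeq ex fines = (PySem.Set.ofList fines).filter (fun l => !PySem.Set.contains ex l) := by
  induction fines with
  | nil => intro ex; rfl
  | cons a t ih =>
    intro ex
    rw [PySem.Set.ofList_cons]
    by_cases h : PySem.Set.contains ex a = true
    · simp only [pvSeq, h, if_pos, List.filter_cons, Bool.not_true,
        PySem.Set.discard, List.filter_filter]
      rw [ih ex]
      apply congrFun (congrArg _ _) _
      funext x
      by_cases hx : x = a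
      · subst hx
        have hm : x ∈ ex := List.contains_iff_mem.mp h
        simp [PySem.Set.contains, hm]
      · simp [hx]
    · simp only [pvSeq, h, if_neg, Bool.not_eq_true, List.filter_cons, Bool.not_false,
        if_true, PySem.Set.discard, List.filter_filter]
      rw [ih (PySem.Set.add ex a)]
      apply congrArg
      apply congrFun (congrArg _ _) _
      funext x
      rw [pv_contains_add]
      by_cases hx : x = a
      · subst hx; simp
      · simp

-- items of the modify-fold over a label list L: the grouped construction B writes down directly.
theorem pv_items_fold (bm : List (String × List String)) (hnd : (bm.map Prod.fst).Nodup)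
    (L : List String) :
    (L.foldl (fun d l => PySem.Dict.modify d (guessCoarse l) [] (fun v => v ++ [l]))
        (PySem.Dict.mk bm)).items
    = (bm.map Prod.fst ++
        (PySem.List.dedup (L.map guessCoarse)).filter (fun c => !(PySem.Dict.mk bm).contains c)).map
        (fun c => (c, (PySem.Dict.mk bm).getD c [] ++ L.filter (fun l => guessCoarse l == c))) := by
  have hnd0 : (PySem.Dict.mk bm).keys.Nodup := by
    rw [PySem.Dict.keys_mk]; exact hnd
  have hndD : (L.foldl (fun d l => PySem.Dict.modify d (guessCoarse l) [] (fun v => v ++ [l]))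
      (PySem.Dict.mk bm)).keys.Nodup :=
    PySem.Dict.nodup_keys_foldl_modify_key L guessCoarse [] (fun _ l v => v ++ [l])
      (PySem.Dict.mk bm) hnd0
  have hkeys : (L.foldl (fun d l => PySem.Dict.modify d (guessCoarse l) [] (fun v => v ++ [l]))
      (PySem.Dict.mk bm)).keys
      = PySem.Set.update (PySem.Dict.mk bm).keys (L.map guessCoarse) :=
    PySem.Dict.keys_foldl_modify_key L guessCoarse [] (fun _ l v => v ++ [l]) (PySem.Dict.mk bm)
  have hgetD : ∀ c, (L.foldl (fun d l => PySem.Dict.modify d (guessCoarse l) [] (fun v => v ++ [l]))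
      (PySem.Dict.mk bm)).getD c []
      = (PySem.Dict.mk bm).getD c [] ++ L.filter (fun l => guessCoarse l == c) := by
    intro c
    have hmap : L.foldl (fun d l => PySem.Dict.modify d (guessCoarse l) [] (fun v => v ++ [l]))
        (PySem.Dict.mk bm)
        = (L.map (fun l => (guessCoarse l, l))).foldl
            (fun d p => PySem.Dict.modify d p.1 [] (fun x => x ++ [p.2])) (PySem.Dict.mk bm) := by
      rw [List.foldl_map]
    rw [hmap, PySem.Dict.getD_foldl_modify_append]
    rw [List.filter_map, List.map_map]
    simp [Function.comp_def]
  rw [PySem.Dict.items_eq_map_keys _ hndD [], hkeys, PySem.Dict.keys_mk,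
    PySem.Set.update_eq_append_filter]
  have hpred : (fun y => !PySem.Set.contains (bm.map Prod.fst) y)
      = (fun c => !(PySem.Dict.mk bm).contains c) := by
    funext c
    have hc : PySem.Set.contains (bm.map Prod.fst) c = (PySem.Dict.mk bm).contains c := by
      rw [PySem.Dict.contains_mk]
      show List.contains (bm.map Prod.fst) c = _
      rw [List.contains_eq_any_beq, List.any_map]
      simp [Function.comp_def, BEq.comm]
    rw [hc]
  have hfun : (fun k => (k, (L.foldl (fun d l => PySem.Dict.modify d (guessCoarse l) []
        (fun v => v ++ [l])) (PySem.Dict.mk bm)).getD k []))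
      = (fun c => (c, (PySem.Dict.mk bm).getD c [] ++ L.filter (fun l => guessCoarse l == c))) := by
    funext c
    rw [hgetD c]
  rw [hpred, hfun]
  simp [PySem.List.dedup]

-- first-match lookup in a dict literal graphed over a key list: the value at the key (for keys
-- outside the list the function must vanish, matching the default)
theorem pv_getD_mk_graph (ks : List String) (F : String → List String) (c : String)
    (h : c ∉ ks → F c = []) :
    (PySem.Dict.mk (ks.map (fun k => (k, F k)))).getD c [] = F c := by
  induction ks with
  | nil =>
    simp only [List.map_nil]
    rw [h (by simp)]
    rfl
  | cons k t ih =>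
    show ((PySem.Dict.mk ((k, F k) :: t.map (fun k => (k, F k)))).get? c).getD [] = F c
    rw [PySem.Dict.get?_mk_cons]
    by_cases hk : k = c
    · subst hk; simp
    · rw [if_neg (by simpa using hk)]
      exact ih (fun hc => h (by simp [hc, Ne.symm hk]))

-- ===== VERDICT (by name: the statement is the Claim_ definition above) =====
theorem augment_hierarchy_py_spec : Claim_equal_augment_hierarchy_py := by
  intro bm fines _ hpre
  have hnd : (bm.map Prod.fst).Nodup := hpre
  simp only [Spec_augment_hierarchy_py, augment_hierarchy_py, augment_hierarchy_py_alt]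
  rw [PySem.Dict.values_mk]
  rw [pv_fold_factor fines (PySem.Dict.mk bm) (PySem.Set.ofList (bm.map (fun p => p.2)).flatten)]
  rw [pv_seq_eq]
  rw [pv_items_fold bm hnd]
  have hkeysAdds : ∀ (nl : List String),
      (PySem.Dict.mk ((PySem.List.dedup (nl.map guessCoarse)).map
        (fun c => (c, nl.filter (fun l => guessCoarse l == c))))).keys
      = PySem.List.dedup (nl.map guessCoarse) := by
    intro nl
    rw [PySem.Dict.keys_mk, List.map_map]
    simp [Function.comp_def]
  have hgetDAdds : ∀ (nl : List String) (c : String),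
      (PySem.Dict.mk ((PySem.List.dedup (nl.map guessCoarse)).map
        (fun c => (c, nl.filter (fun l => guessCoarse l == c))))).getD c []
      = nl.filter (fun l => guessCoarse l == c) := by
    intro nl c
    apply pv_getD_mk_graph
    intro hc
    rw [List.filter_eq_nil_iff]
    intro l hl hg
    exact hc (by
      rw [PySem.List.dedup, PySem.Set.mem_ofList]
      exact List.mem_map.mpr ⟨l, hl, by simpa using hg⟩)
  have hL : ((PySem.Set.ofList fines).filter
        (fun l => !PySem.Set.contains (PySem.Set.ofList (bm.map (fun p => p.2)).flatten) l))
      = (PySem.List.dedup fines).filter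
        (fun l => !PySem.Set.contains (PySem.Set.ofList (bm.map (fun p => p.2)).flatten) l) := by
    simp [PySem.List.dedup]
  rw [hkeysAdds]
  have hfun2 : ∀ (nl : List String), (fun c => (c, (PySem.Dict.mk bm).getD c [] ++
        (PySem.Dict.mk ((PySem.List.dedup (nl.map guessCoarse)).map
          (fun c => (c, nl.filter (fun l => guessCoarse l == c))))).getD c []))
      = (fun c => (c, (PySem.Dict.mk bm).getD c [] ++ nl.filter (fun l => guessCoarse l == c))) := by
    intro nl
    funext c
    rw [hgetDAdds nl c]
  rw [hfun2]
  rw [hL]
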